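-- pv_equiv track=rewrite | github.com/adrienjoseph1/Fruit-Ninja-CV | CodeBase/tp3.py | createAddList
-- ===== SOURCE A (Python) =====
-- def createAddList(x, y, coords):
--     x, y = coords[0], coords[1]
--     addLX, addLY = [0], [0]
--
--     for i in range(2, len(coords)):
--         if i%2==0:
--             addLX.append(coords[i] - x)
--         else:
--             addLY.append(coords[i] - y)
--     return addLX, addLY
-- ===== SOURCE B (Python) =====
-- def createAddList(x, y, coords):
--     x0, y0 = coords[0], coords[1]
--     addLX = [0] + [c - x0 for c in coords[2::2]]
--     addLY = [0] + [c - y0 for c in coords[3::2]]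
--     return addLX, addLY
-- ===== Notes on version B (the rewrite author's own statement) =====
-- stated objective: idiomatic
-- what changed: Replaces A's single index loop with a parity branch by two strided slices coords[2::2] and coords[3::2], each mapped to its offset list in a comprehension, with the leading 0 prepended.
import Mathlib
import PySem

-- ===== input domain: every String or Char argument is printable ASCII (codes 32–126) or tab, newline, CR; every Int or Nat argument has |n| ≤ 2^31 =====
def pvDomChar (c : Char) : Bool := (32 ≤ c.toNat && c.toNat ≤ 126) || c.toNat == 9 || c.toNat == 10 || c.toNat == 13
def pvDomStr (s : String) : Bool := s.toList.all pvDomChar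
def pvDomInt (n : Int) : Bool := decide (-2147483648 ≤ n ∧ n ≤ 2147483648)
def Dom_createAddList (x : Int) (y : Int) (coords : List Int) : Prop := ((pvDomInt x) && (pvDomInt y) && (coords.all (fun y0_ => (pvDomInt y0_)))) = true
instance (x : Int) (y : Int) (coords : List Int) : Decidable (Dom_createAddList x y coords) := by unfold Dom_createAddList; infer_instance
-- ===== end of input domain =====

-- B replaces A's parity-branching index loop by two strided slices coords[2::2] / coords[3::2] mapped to offsets (objective: idiomatic decomposition, same O(n) cost).

-- ===== PORT A =====
-- literal port of A: reassign x,y from coords[0],coords[1], then loop i = 2 .. len-1 appending by parity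
def createAddList (x : Int) (y : Int) (coords : List Int) : List Int × List Int :=
  let x0 : Int := PySem.List.pyGetD coords 0 0   -- coords[0], exact under Pre_
  let y0 : Int := PySem.List.pyGetD coords 1 0   -- coords[1], exact under Pre_
  (PySem.List.pyRange 2 (PySem.List.len coords)).foldl
    (fun (acc : List Int × List Int) i =>
      if PySem.Int.mod i 2 = 0 then (acc.1 ++ [PySem.List.pyGetD coords i 0 - x0], acc.2)
      else (acc.1, acc.2 ++ [PySem.List.pyGetD coords i 0 - y0]))
    ([0], [0])

-- ===== PORT B =====
def createAddList_alt (x : Int) (y : Int) (coords : List Int) : List Int × List Int :=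
  let x0 : Int := PySem.List.pyGetD coords 0 0   -- coords[0], exact under Pre_
  let y0 : Int := PySem.List.pyGetD coords 1 0   -- coords[1], exact under Pre_
  let addLX : List Int := 0 :: ((PySem.List.slice? coords (some 2) none 2).getD []).map (fun c => c - x0)
  let addLY : List Int := 0 :: ((PySem.List.slice? coords (some 3) none 2).getD []).map (fun c => c - y0)
  (addLX, addLY)

-- ===== PRECONDITION & SPEC =====
-- Pre_ excludes exactly the inputs with fewer than two coords, where the Python A (and B) raise IndexError at coords[0]/coords[1].
def Pre_createAddList (x : Int) (y : Int) (coords : List Int) : Prop := 2 ≤ coords.length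
instance (x : Int) (y : Int) (coords : List Int) : Decidable (Pre_createAddList x y coords) := by unfold Pre_createAddList; infer_instance
def pvWitness_createAddList : Int × Int × List Int := (0, 0, [10, 20, 30, 40, 50])

def Spec_createAddList (x : Int) (y : Int) (coords : List Int) (out : List Int × List Int) : Prop := out = createAddList_alt x y coords
instance (x : Int) (y : Int) (coords : List Int) (out : List Int × List Int) : Decidable (Spec_createAddList x y coords out) := by unfold Spec_createAddList; infer_instance

-- ===== CLAIM (what is proved, stated in full; the proofs are below) =====
def Claim_equal_createAddList : Prop := ∀ (x : Int) (y : Int) (coords : List Int), Dom_createAddList x y coords → Pre_createAddList x y coords → Spec_createAddList x y coords (createAddList x y coords)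

-- ===== LEMMAS AND PROOFS =====

-- every second element (indices 0,2,4,…)
def everyOther {α : Type} : List α → List α
  | [] => []
  | [a] => [a]
  | a :: _ :: r => a :: everyOther r

theorem everyOther_cons_tail {α : Type} (a : α) (l : List α) :
    everyOther (a :: l) = a :: everyOther l.tail := by
  cases l <;> simp [everyOther]

-- a take-every-other comprehension over in-range indices is everyOther
theorem filterMap_range_two {α : Type} :
    ∀ (n : ℕ) (l : List α), l.length ≤ 2 * n →
      (List.range n).filterMap (fun k => l[2 * k]?) = everyOther l := by
  intro n
  induction n with
  | zero =>
    intro l h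
    have : l = [] := List.eq_nil_of_length_eq_zero (by omega)
    simp [this, everyOther]
  | succ m ih =>
    intro l h
    rw [List.range_succ_eq_map, List.filterMap_cons, List.filterMap_map]
    match l with
    | [] => simp [everyOther]
    | a :: t =>
      have h0 : (a :: t)[2 * 0]? = some a := rfl
      rw [h0]
      have hrec : (List.range m).filterMap ((fun k => (a :: t)[2 * k]?) ∘ Nat.succ)
          = (List.range m).filterMap (fun k => t.tail[2 * k]?) := by
        apply List.filterMap_congr
        intro k _
        simp only [Function.comp]
        have : 2 * Nat.succ k = (2 * k + 1) + 1 := by omega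
        rw [this]
        cases t with
        | nil => simp
        | cons b t' => simp [List.getElem?_cons_succ]
      rw [hrec, ih t.tail (by cases t <;> simp_all <;> omega), everyOther_cons_tail]

-- Python xs[a::2] is everyOther of the dropped list
theorem slice?_step_two (xs : List Int) (a : ℕ) :
    PySem.List.slice? xs (some (a : Int)) none 2 = some (everyOther (xs.drop a)) := by
  unfold PySem.List.slice? PySem.List.sliceIndices
  simp only [if_neg (by norm_num : ¬ (2:Int) = 0)]
  norm_num
  simp only [if_neg (show ¬((a:Int) < 0) by omega)]
  by_cases hal : (a : Int) < (xs.length : Int)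
  · simp only [min_eq_left (by omega : (a:Int) ≤ (xs.length : Int)), if_pos hal]
    congr 1
    have hmap : (fun (k : ℕ) => xs[((a : Int) + 2 * (k : Int)).toNat]?)
        = (fun (k : ℕ) => (xs.drop a)[2 * k]?) := by
      funext k
      have harith : ((a : Int) + 2 * (k : Int)).toNat = a + 2 * k := by omega
      rw [harith, List.getElem?_drop]
    rw [hmap]
    apply filterMap_range_two
    have h1 : (xs.drop a).length = xs.length - a := by simp
    have h2 : (0:Int) ≤ ((xs.length : Int) - a + 2 - 1) / 2 := Int.ediv_nonneg (by omega) (by norm_num)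
    omega
  · simp only [min_eq_right (by omega : (xs.length : Int) ≤ (a:Int)), if_neg (by omega : ¬((xs.length:Int) < (xs.length:Int)))]
    have : xs.drop a = [] := List.drop_eq_nil_of_le (by omega)
    simp [this, everyOther]

-- A's loop from an even start index appends exactly the strided offsets of coords.drop n
theorem loopA (coords : List Int) (x0 y0 : Int) :
    ∀ (t : List Int) (n : ℕ), coords.drop n = t → n % 2 = 0 → ∀ (lx ly : List Int),
      (PySem.List.pyRange (n : Int) (PySem.List.len coords)).foldl
        (fun (acc : List Int × List Int) i =>
          if PySem.Int.mod i 2 = 0 then (acc.1 ++ [PySem.List.pyGetD coords i 0 - x0], acc.2)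
          else (acc.1, acc.2 ++ [PySem.List.pyGetD coords i 0 - y0]))
        (lx, ly)
      = (lx ++ (everyOther t).map (fun c => c - x0),
         ly ++ (everyOther t.tail).map (fun c => c - y0))
  | [], n, ht, hpar, lx, ly => by
    have hn : coords.length ≤ n := by
      by_contra h
      have := List.drop_eq_nil_iff.mp ht
      omega
    have hr : PySem.List.pyRange (n : Int) (PySem.List.len coords) = [] := by
      simp [PySem.List.pyRange, PySem.List.len]
      omega
    rw [hr]
    simp [everyOther]
  | [a], n, ht, hpar, lx, ly => by
    have hlen : coords.length = n + 1 := by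
      have := congrArg List.length ht
      simp at this; omega
    have hr1 : PySem.List.pyRange (n : Int) (PySem.List.len coords)
        = (n : Int) :: PySem.List.pyRange ((n : Int) + 1) (PySem.List.len coords) := by
      apply PySem.List.pyRange_one_cons
      simp [PySem.List.len]; omega
    have hr2 : PySem.List.pyRange ((n : Int) + 1) (PySem.List.len coords) = [] := by
      simp [PySem.List.pyRange, PySem.List.len]
      omega
    have hmod : PySem.Int.mod (n : Int) 2 = 0 := by
      simp [PySem.Int.mod, Int.fmod_eq_emod]
      omega
    have hq : coords[n]? = some a := by
      have h : (List.drop n coords)[0]? = coords[n+0]? := List.getElem?_drop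
      rw [ht] at h; simpa using h.symm
    have hget : PySem.List.pyGetD coords (n : Int) 0 = a := by
      rw [PySem.List.pyGetD_natCast, List.getD_eq_getElem?_getD, hq]; rfl
    rw [hr1, hr2]
    simp only [List.foldl_cons, List.foldl_nil, if_pos hmod, hget]
    simp [everyOther]
  | a :: b :: r, n, ht, hpar, lx, ly => by
    have hlen : n + 2 ≤ coords.length := by
      have := congrArg List.length ht
      simp at this; omega
    have hr1 : PySem.List.pyRange (n : Int) (PySem.List.len coords)
        = (n : Int) :: PySem.List.pyRange ((n : Int) + 1) (PySem.List.len coords) := by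
      apply PySem.List.pyRange_one_cons; simp [PySem.List.len]; omega
    have hr2 : PySem.List.pyRange ((n : Int) + 1) (PySem.List.len coords)
        = ((n : Int) + 1) :: PySem.List.pyRange ((n : Int) + 2) (PySem.List.len coords) := by
      apply PySem.List.pyRange_one_cons; simp [PySem.List.len]; omega
    have hmodn : PySem.Int.mod (n : Int) 2 = 0 := by
      simp [PySem.Int.mod, Int.fmod_eq_emod]; omega
    have hmodn1 : ¬ PySem.Int.mod ((n : Int) + 1) 2 = 0 := by
      simp [PySem.Int.mod, Int.fmod_eq_emod]; omega
    have hqa : coords[n]? = some a := by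
      have h : (List.drop n coords)[0]? = coords[n+0]? := List.getElem?_drop
      rw [ht] at h; simpa using h.symm
    have hgeta : PySem.List.pyGetD coords (n : Int) 0 = a := by
      rw [PySem.List.pyGetD_natCast, List.getD_eq_getElem?_getD, hqa]; rfl
    have hqb : coords[n+1]? = some b := by
      have h : (List.drop n coords)[1]? = coords[n+1]? := List.getElem?_drop
      rw [ht] at h; simpa using h.symm
    have hgetb : PySem.List.pyGetD coords ((n : Int) + 1) 0 = b := by
      have hc : ((n : Int) + 1) = ((n + 1 : ℕ) : Int) := by push_cast; ring
      rw [hc, PySem.List.pyGetD_natCast, List.getD_eq_getElem?_getD, hqb]; rfl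
    have hdrop : coords.drop (n + 2) = r := by
      have h := congrArg (List.drop 2) ht
      rw [List.drop_drop] at h
      simpa [Nat.add_comm] using h
    have hc2 : ((n : Int) + 2) = ((n + 2 : ℕ) : Int) := by push_cast; ring
    rw [hr1, hr2]
    simp only [List.foldl_cons, if_pos hmodn, if_neg hmodn1, hgeta, hgetb]
    rw [hc2, loopA coords x0 y0 r (n+2) hdrop (by omega) _ _]
    simp [everyOther, everyOther_cons_tail]
  termination_by t _ _ _ => t.length

-- ===== VERDICT (by name: the statement is the Claim_ definition above) =====
theorem createAddList_spec : Claim_equal_createAddList := by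
  intro x y coords _ _
  unfold Spec_createAddList
  simp only [createAddList, createAddList_alt]
  have h := loopA coords (PySem.List.pyGetD coords 0 0) (PySem.List.pyGetD coords 1 0)
      (coords.drop 2) 2 rfl rfl ([0]) ([0])
  have h2 := slice?_step_two coords 2
  have h3 := slice?_step_two coords 3
  norm_cast at h h2 h3
  rw [h, h2, h3]
  simp [List.tail_drop]
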